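-- pv_equiv track=rewrite | github.com/tteon/seocho | seocho/benchmarking.py | split_finder_diagnosis
-- ===== SOURCE A (Python) =====
-- from typing import Any, Dict, Iterable, List, Mapping, Sequence
--
-- _FINDER_INDEXING_FINDINGS = {
--     "indexing_no_graph_writes",
--     "source_text_has_answer_but_graph_projection_lost_it",
-- }
--
-- _FINDER_QUERY_FINDINGS = {
--     "query_no_graph_records",
--     "query_execution_failed_or_contract_error",
--     "vector_substrate_not_in_local_answer_path",
--     "fulltext_substrate_unavailable_or_unchecked",
--     "answer_quality_or_slot_selection_gap",
--     "support_claim_answer_mismatch",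
-- }
--
-- def split_finder_diagnosis(findings: Sequence[str]) -> Dict[str, List[str]]:
--     """Split FinDER diagnosis codes into indexing vs query contracts."""
--
--     contracts = {"indexing": [], "query": [], "shared": []}
--     seen: set[str] = set()
--     for raw in findings:
--         finding = str(raw or "").strip()
--         if not finding or finding in seen:
--             continue
--         seen.add(finding)
--         if finding in _FINDER_INDEXING_FINDINGS:
--             contracts["indexing"].append(finding)
--         elif finding in _FINDER_QUERY_FINDINGS:
--             contracts["query"].append(finding)
--         else:
--             contracts["shared"].append(finding)
--     return contracts
-- ===== SOURCE B (Python) =====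
-- _FINDER_INDEXING_FINDINGS = {
--     "indexing_no_graph_writes",
--     "source_text_has_answer_but_graph_projection_lost_it",
-- }
--
-- _FINDER_QUERY_FINDINGS = {
--     "query_no_graph_records",
--     "query_execution_failed_or_contract_error",
--     "vector_substrate_not_in_local_answer_path",
--     "fulltext_substrate_unavailable_or_unchecked",
--     "answer_quality_or_slot_selection_gap",
--     "support_claim_answer_mismatch",
-- }
--
-- def split_finder_diagnosis(findings):
--     """Dedup/clean once, then partition by three independent passes."""
--     cleaned = [f for f in dict.fromkeys(str(raw or "").strip() for raw in findings) if f]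
--     return {
--         "indexing": [f for f in cleaned if f in _FINDER_INDEXING_FINDINGS],
--         "query": [f for f in cleaned if f in _FINDER_QUERY_FINDINGS],
--         "shared": [f for f in cleaned
--                    if f not in _FINDER_INDEXING_FINDINGS and f not in _FINDER_QUERY_FINDINGS],
--     }
-- ===== Notes on version B (the rewrite author's own statement) =====
-- stated objective: simpler
-- what changed: Replaces the single stateful loop that branches and appends into a dict with a one-pass dedup/clean of the findings followed by three independent membership-filter passes that assemble the dict.
import Mathlib
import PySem

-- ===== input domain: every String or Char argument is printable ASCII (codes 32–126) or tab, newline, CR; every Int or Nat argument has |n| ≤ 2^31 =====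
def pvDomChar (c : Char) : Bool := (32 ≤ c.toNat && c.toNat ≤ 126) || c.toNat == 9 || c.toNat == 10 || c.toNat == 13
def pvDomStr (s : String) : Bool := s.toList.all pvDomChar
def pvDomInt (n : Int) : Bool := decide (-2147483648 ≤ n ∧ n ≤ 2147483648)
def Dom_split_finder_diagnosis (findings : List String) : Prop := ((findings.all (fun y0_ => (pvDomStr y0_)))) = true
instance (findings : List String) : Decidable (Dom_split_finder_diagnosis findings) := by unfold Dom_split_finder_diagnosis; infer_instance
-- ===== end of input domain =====

-- B dedups/cleans the findings in one pass and then builds each bucket by its own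
-- membership-filter pass, instead of A's single loop that branches and appends; same cost, simpler shape.

-- ===== PORT A =====
def finderIndexing : List String :=
  ["indexing_no_graph_writes",
   "source_text_has_answer_but_graph_projection_lost_it"]

def finderQuery : List String :=
  ["query_no_graph_records",
   "query_execution_failed_or_contract_error",
   "vector_substrate_not_in_local_answer_path",
   "fulltext_substrate_unavailable_or_unchecked",
   "answer_quality_or_slot_selection_gap",
   "support_claim_answer_mismatch"]

-- one iteration of A's loop; the dict has the three fixed keys "indexing"/"query"/"shared"
-- throughout, so the state is their three value lists plus the 'seen' set
def stepA (st : List String × List String × List String × PySem.Set String) (raw : String) :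
    List String × List String × List String × PySem.Set String :=
  let finding := PySem.Str.strip raw
  if finding = "" ∨ st.2.2.2.contains finding then st
  else
    let seen := PySem.Set.add st.2.2.2 finding
    if finderIndexing.contains finding then (st.1 ++ [finding], st.2.1, st.2.2.1, seen)
    else if finderQuery.contains finding then (st.1, st.2.1 ++ [finding], st.2.2.1, seen)
    else (st.1, st.2.1, st.2.2.1 ++ [finding], seen)

def split_finder_diagnosis (findings : List String) : List (String × List String) :=
  let st := findings.foldl stepA ([], [], [], PySem.Set.empty)
  [("indexing", st.1), ("query", st.2.1), ("shared", st.2.2.1)]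

-- ===== PORT B =====
def split_finder_diagnosis_alt (findings : List String) : List (String × List String) :=
  let cleaned := (PySem.List.dedup (findings.map (fun raw => PySem.Str.strip raw))).filter
    (fun f => !(f == ""))
  [("indexing", cleaned.filter (fun f => finderIndexing.contains f)),
   ("query", cleaned.filter (fun f => finderQuery.contains f)),
   ("shared", cleaned.filter (fun f => !finderIndexing.contains f && !finderQuery.contains f))]

-- ===== PRECONDITION & SPEC =====
def Spec_split_finder_diagnosis (findings : List String) (out : List (String × List String)) : Prop := out = split_finder_diagnosis_alt findings
instance (findings : List String) (out : List (String × List String)) : Decidable (Spec_split_finder_diagnosis findings out) := by unfold Spec_split_finder_diagnosis; infer_instance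

-- ===== CLAIM (what is proved, stated in full; the proofs are below) =====
def Claim_equal_split_finder_diagnosis : Prop := ∀ (findings : List String), Dom_split_finder_diagnosis findings → Spec_split_finder_diagnosis findings (split_finder_diagnosis findings)

-- ===== LEMMAS AND PROOFS =====

-- the stripped values of rs that are new relative to the already-seen list s, in first-occurrence order
def newOf (s : List String) : List String → List String
  | [] => []
  | r :: rs =>
    let f := PySem.Str.strip r
    if s.contains f then newOf s rs else f :: newOf (s ++ [f]) rs

theorem newOf_cons_mem {s : List String} {r : String} (rs : List String)
    (h : s.contains (PySem.Str.strip r) = true) :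
    newOf s (r :: rs) = newOf s rs := by
  simp only [newOf]
  rw [if_pos h]

theorem newOf_cons_not_mem {s : List String} {r : String} (rs : List String)
    (h : s.contains (PySem.Str.strip r) = false) :
    newOf s (r :: rs) = PySem.Str.strip r :: newOf (s ++ [PySem.Str.strip r]) rs := by
  simp only [newOf]
  rw [if_neg (by rw [h]; simp)]

theorem stepA_skip {st : List String × List String × List String × PySem.Set String} {raw : String}
    (h : PySem.Str.strip raw = "" ∨ st.2.2.2.contains (PySem.Str.strip raw) = true) :
    stepA st raw = st := by
  simp only [stepA]
  rw [if_pos (by simpa using h)]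

theorem foldl_add_eq_newOf (rs : List String) (s : PySem.Set String) :
    (rs.map (fun r => PySem.Str.strip r)).foldl PySem.Set.add s = s ++ newOf s rs := by
  induction rs generalizing s with
  | nil => simp [newOf]
  | cons r rs ih =>
    simp only [List.map_cons, List.foldl_cons]
    by_cases h : s.contains (PySem.Str.strip r) = true
    · rw [PySem.Set.add_of_mem (by simpa using h), ih, newOf_cons_mem rs h]
    · rw [PySem.Set.add_of_not_mem (by simpa using h), ih,
        newOf_cons_not_mem rs (by simpa using h)]
      simp

theorem indexing_query_disjoint (f : String) (h : finderIndexing.contains f = true) :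
    finderQuery.contains f = false := by
  simp only [finderIndexing, List.contains_cons, List.contains_nil, Bool.or_false,
    Bool.or_eq_true, beq_iff_eq] at h
  rcases h with h | h <;> subst h <;> decide

-- main invariant: the A-loop from any state (idx,qry,shr,s) appends exactly the partitioned
-- clean new findings, where membership is tested against any list t agreeing with s off ""
theorem loop_eq (rs : List String) :
    ∀ (s t idx qry shr : List String),
    (∀ f : String, f ≠ "" → s.contains f = t.contains f) →
    (rs.foldl stepA (idx, qry, shr, s)).1 =
        idx ++ ((newOf t rs).filter (fun f => !(f == ""))).filter
          (fun f => finderIndexing.contains f) ∧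
    (rs.foldl stepA (idx, qry, shr, s)).2.1 =
        qry ++ ((newOf t rs).filter (fun f => !(f == ""))).filter
          (fun f => finderQuery.contains f) ∧
    (rs.foldl stepA (idx, qry, shr, s)).2.2.1 =
        shr ++ ((newOf t rs).filter (fun f => !(f == ""))).filter
          (fun f => !finderIndexing.contains f && !finderQuery.contains f) := by
  induction rs with
  | nil => intro s t idx qry shr _; simp [newOf]
  | cons r rs ih =>
    intro s t idx qry shr hst
    rw [List.foldl_cons]
    by_cases he : PySem.Str.strip r = ""
    · rw [stepA_skip (st := (idx, qry, shr, s)) (Or.inl he)]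
      by_cases ht : t.contains (PySem.Str.strip r) = true
      · rw [newOf_cons_mem rs ht]
        exact ih s t idx qry shr hst
      · rw [newOf_cons_not_mem rs (by simpa using ht)]
        have hst' : ∀ f : String, f ≠ "" → s.contains f = (t ++ [PySem.Str.strip r]).contains f := by
          intro f hf
          rw [hst f hf, he]
          simp [hf]
        obtain ⟨i1, i2, i3⟩ := ih s (t ++ [PySem.Str.strip r]) idx qry shr hst'
        refine ⟨?_, ?_, ?_⟩ <;> simp [i1, i2, i3, List.filter_cons, he]
    · by_cases hs : s.contains (PySem.Str.strip r) = true
      · have ht : t.contains (PySem.Str.strip r) = true := by rw [← hst _ he]; exact hs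
        rw [stepA_skip (st := (idx, qry, shr, s)) (Or.inr hs), newOf_cons_mem rs ht]
        exact ih s t idx qry shr hst
      · have ht : t.contains (PySem.Str.strip r) = false := by
          rw [← hst _ he]; simpa using hs
        have hadd : PySem.Set.add s (PySem.Str.strip r) = s ++ [PySem.Str.strip r] :=
          PySem.Set.add_of_not_mem (by simpa using hs)
        have hstep : stepA (idx, qry, shr, s) r =
            if finderIndexing.contains (PySem.Str.strip r) then
              (idx ++ [PySem.Str.strip r], qry, shr, s ++ [PySem.Str.strip r])
            else if finderQuery.contains (PySem.Str.strip r) then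
              (idx, qry ++ [PySem.Str.strip r], shr, s ++ [PySem.Str.strip r])
            else (idx, qry, shr ++ [PySem.Str.strip r], s ++ [PySem.Str.strip r]) := by
          simp only [stepA, hadd, PySem.Set.contains_eq_listContains]
          rw [if_neg (not_or.mpr ⟨he, hs⟩)]
        have hst' : ∀ f : String, f ≠ "" →
            (s ++ [PySem.Str.strip r]).contains f = (t ++ [PySem.Str.strip r]).contains f := by
          intro f hf
          simp only [List.contains_append]
          rw [hst f hf]
        rw [hstep, newOf_cons_not_mem rs ht]
        by_cases h1 : finderIndexing.contains (PySem.Str.strip r) = true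
        · have h2 := indexing_query_disjoint _ h1
          have hm1 : PySem.Str.strip r ∈ finderIndexing := by simpa using h1
          have hm2 : PySem.Str.strip r ∉ finderQuery := by simpa using h2
          rw [if_pos h1]
          obtain ⟨i1, i2, i3⟩ := ih (s ++ [PySem.Str.strip r]) (t ++ [PySem.Str.strip r])
            (idx ++ [PySem.Str.strip r]) qry shr hst'
          refine ⟨?_, ?_, ?_⟩ <;> simp [i1, i2, i3, List.filter_cons, he, h1, h2, hm1, hm2]
        · rw [if_neg (by simpa using h1)]
          by_cases h2 : finderQuery.contains (PySem.Str.strip r) = true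
          · have hm1 : PySem.Str.strip r ∉ finderIndexing := by simpa using h1
            have hm2 : PySem.Str.strip r ∈ finderQuery := by simpa using h2
            rw [if_pos h2]
            obtain ⟨i1, i2, i3⟩ := ih (s ++ [PySem.Str.strip r]) (t ++ [PySem.Str.strip r])
              idx (qry ++ [PySem.Str.strip r]) shr hst'
            refine ⟨?_, ?_, ?_⟩ <;>
              simp [i1, i2, i3, List.filter_cons, he, hm1, hm2]
          · have hm1 : PySem.Str.strip r ∉ finderIndexing := by simpa using h1
            have hm2 : PySem.Str.strip r ∉ finderQuery := by simpa using h2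
            rw [if_neg (by simpa using h2)]
            obtain ⟨i1, i2, i3⟩ := ih (s ++ [PySem.Str.strip r]) (t ++ [PySem.Str.strip r])
              idx qry (shr ++ [PySem.Str.strip r]) hst'
            refine ⟨?_, ?_, ?_⟩ <;>
              simp [i1, i2, i3, List.filter_cons, he, hm1, hm2]

theorem cleaned_eq (findings : List String) :
    (PySem.List.dedup (findings.map (fun raw => PySem.Str.strip raw))).filter (fun f => !(f == ""))
      = (newOf [] findings).filter (fun f => !(f == "")) := by
  have h : PySem.List.dedup (findings.map (fun raw => PySem.Str.strip raw))
      = (findings.map (fun raw => PySem.Str.strip raw)).foldl PySem.Set.add [] := by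
    rw [PySem.List.dedup_eq_ofList, PySem.Set.ofList_eq_foldl]
  rw [h, foldl_add_eq_newOf]
  simp

-- ===== VERDICT (by name: the statement is the Claim_ definition above) =====
theorem split_finder_diagnosis_spec : Claim_equal_split_finder_diagnosis := by
  intro findings _
  unfold Spec_split_finder_diagnosis
  show split_finder_diagnosis findings = split_finder_diagnosis_alt findings
  obtain ⟨h1, h2, h3⟩ := loop_eq findings PySem.Set.empty [] [] [] [] (fun _ _ => rfl)
  simp only [List.nil_append] at h1 h2 h3
  simp only [split_finder_diagnosis, split_finder_diagnosis_alt]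
  rw [cleaned_eq, h1, h2, h3]
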